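-- pv_equiv track=rewrite | github.com/nhortensioUAL/ualap2021_grupo1 | Lab3/Lab3_Parte2.py | append_positions
-- ===== SOURCE A (Python) =====
-- def append_positions(l1, l2):
--    lista_intercala = []
--    lista = []
--    nr_iteracoes = 0
--    if(len(l1) < len(l2)):
--        nr_iteracoes = len(l1)
--    else:
--         nr_iteracoes = len(l2)
--    for i in range(nr_iteracoes):
--         lista.append(l1[i])
--         lista.append(l2[i])
--    for i in range(nr_iteracoes):
--         lista_intercala.append(lista[i])
--    return lista_intercala
-- ===== SOURCE B (Python) =====
-- def append_positions(l1, l2):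
--     n = min(len(l1), len(l2))
--     return [l1[k // 2] if k % 2 == 0 else l2[k // 2] for k in range(n)]
-- ===== Notes on version B (the rewrite author's own statement) =====
-- stated objective: simpler
-- what changed: B computes each output position directly by parity (l1[k//2] for even k, l2[k//2] for odd k) in one pass, instead of A's two phases of materialising the full 2n-element interleave and then copying its first n elements.
import Mathlib
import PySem

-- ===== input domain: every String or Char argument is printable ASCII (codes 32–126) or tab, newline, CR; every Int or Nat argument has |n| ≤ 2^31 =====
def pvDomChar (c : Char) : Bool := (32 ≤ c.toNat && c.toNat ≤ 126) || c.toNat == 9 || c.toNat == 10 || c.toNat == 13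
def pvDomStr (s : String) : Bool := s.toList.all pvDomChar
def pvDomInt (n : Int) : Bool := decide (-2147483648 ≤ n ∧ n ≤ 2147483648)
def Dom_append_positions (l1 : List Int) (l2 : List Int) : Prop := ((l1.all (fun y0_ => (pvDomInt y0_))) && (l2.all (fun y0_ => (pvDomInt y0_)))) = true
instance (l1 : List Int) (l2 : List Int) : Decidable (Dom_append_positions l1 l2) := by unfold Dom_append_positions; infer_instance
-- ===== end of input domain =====

-- B builds each output position directly by parity in one pass, instead of A's
-- full 2n-element interleave followed by copying its first n elements (simpler).


-- ===== PORT A =====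
-- two-phase: build the full interleave 'lista' (length 2n), then copy its first n elements
def append_positions (l1 : List Int) (l2 : List Int) : List Int :=
  let nr_iteracoes : Int := if l1.length < l2.length then (l1.length : Int) else (l2.length : Int)
  let lista : List Int :=
    (PySem.List.pyRange 0 nr_iteracoes 1).foldl
      (fun acc i => acc ++ [PySem.List.pyGetD l1 i 0] ++ [PySem.List.pyGetD l2 i 0]) []
  (PySem.List.pyRange 0 nr_iteracoes 1).foldl
    (fun acc i => acc ++ [PySem.List.pyGetD lista i 0]) []

-- ===== PORT B =====
-- single pass: position k takes l1[k//2] when k is even, l2[k//2] when k is odd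
def append_positions_alt (l1 : List Int) (l2 : List Int) : List Int :=
  let n : Int := min (l1.length : Int) (l2.length : Int)
  (PySem.List.pyRange 0 n 1).map
    (fun k => if PySem.Int.mod k 2 = 0
              then PySem.List.pyGetD l1 (PySem.Int.floordiv k 2) 0
              else PySem.List.pyGetD l2 (PySem.Int.floordiv k 2) 0)

-- ===== PRECONDITION & SPEC =====
def Spec_append_positions (l1 : List Int) (l2 : List Int) (out : List Int) : Prop := out = append_positions_alt l1 l2
instance (l1 : List Int) (l2 : List Int) (out : List Int) : Decidable (Spec_append_positions l1 l2 out) := by unfold Spec_append_positions; infer_instance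

-- ===== CLAIM (what is proved, stated in full; the proofs are below) =====
def Claim_equal_append_positions : Prop := ∀ (l1 : List Int) (l2 : List Int), Dom_append_positions l1 l2 → Spec_append_positions l1 l2 (append_positions l1 l2)

-- ===== LEMMAS AND PROOFS =====

-- the intended per-position value, on Nat indices
def pvF (l1 l2 : List Int) (k : Nat) : Int :=
  if k % 2 = 0 then l1.getD (k / 2) 0 else l2.getD (k / 2) 0

-- A's first loop builds exactly the interleave, characterised positionally
theorem pvFold1 (l1 l2 : List Int) (m : Nat) (acc : List Int) :
    (List.range m).foldl (fun a k => a ++ [l1.getD k 0] ++ [l2.getD k 0]) acc =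
      acc ++ (List.range (2 * m)).map (pvF l1 l2) := by
  induction m with
  | zero => simp
  | succ m ih =>
      have e1 : pvF l1 l2 (2 * m) = l1.getD m 0 := by
        unfold pvF; rw [if_pos (by omega), show 2 * m / 2 = m by omega]
      have e2 : pvF l1 l2 (2 * m + 1) = l2.getD m 0 := by
        unfold pvF; rw [if_neg (by omega), show (2 * m + 1) / 2 = m by omega]
      rw [List.range_succ, List.foldl_append, ih,
          show 2 * (m + 1) = (2 * m + 1) + 1 by ring, List.range_succ, List.range_succ]
      simp [e1, e2, List.foldl]

-- indexing the interleave below 2m reads pvF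
theorem pvLista_getD (l1 l2 : List Int) (m k : Nat) (hk : k < 2 * m) :
    ((List.range (2 * m)).map (pvF l1 l2)).getD k 0 = pvF l1 l2 k := by
  rw [List.getD_eq_getElem?_getD, List.getElem?_map, List.getElem?_range hk]
  rfl

-- B's per-index Int function agrees with pvF on a Nat cast
theorem pvBfun (l1 l2 : List Int) (k : Nat) :
    (if PySem.Int.mod (k : Int) 2 = 0
       then PySem.List.pyGetD l1 (PySem.Int.floordiv (k : Int) 2) 0
       else PySem.List.pyGetD l2 (PySem.Int.floordiv (k : Int) 2) 0) = pvF l1 l2 k := by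
  rw [PySem.Int.mod_eq_emod_of_pos (by norm_num : (0:Int) < 2),
      PySem.Int.floordiv_eq_ediv_of_pos (by norm_num : (0:Int) < 2)]
  have hmod : ((k : Int) % 2 = 0) ↔ k % 2 = 0 := by omega
  have hdiv : ((k : Int) / 2) = ((k / 2 : Nat) : Int) := by omega
  unfold pvF
  by_cases hk : k % 2 = 0
  · rw [if_pos (hmod.mpr hk), if_pos hk, hdiv, PySem.List.pyGetD_natCast]
  · rw [if_neg (fun h => hk (hmod.mp h)), if_neg hk, hdiv, PySem.List.pyGetD_natCast]

theorem pv_min_eq (l1 l2 : List Int) :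
    (if l1.length < l2.length then (l1.length : Int) else (l2.length : Int)) =
      min (l1.length : Int) (l2.length : Int) := by
  split_ifs with h <;> omega

-- ===== VERDICT (by name: the statement is the Claim_ definition above) =====
theorem append_positions_spec : Claim_equal_append_positions := by
  intro l1 l2 _
  unfold Spec_append_positions
  simp only [append_positions, append_positions_alt, pv_min_eq]
  generalize min (l1.length : Int) (l2.length : Int) = n
  have hr : PySem.List.pyRange 0 n 1 = (List.range n.toNat).map (Nat.cast : Nat → Int) := by
    rw [PySem.List.pyRange_one, Int.sub_zero]
    exact List.map_congr_left fun k _ => by simp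
  rw [hr]
  simp only [List.foldl_map, PySem.List.pyGetD_natCast, List.map_map, Function.comp_def]
  simp only [pvFold1, List.nil_append]
  rw [PySem.List.foldl_append_singleton_eq_map, List.nil_append]
  refine List.map_congr_left (fun k hk => ?_)
  rw [List.mem_range] at hk
  rw [pvLista_getD l1 l2 n.toNat k (by omega), ← pvBfun l1 l2 k]
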